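-- pv_equiv track=rewrite | github.com/m-malandro/composers-assistant-REAPER | src/Scripts/composers_assistant_v2/midisong.py | _sorted_list_to_list_of_contiguous_sub_lists
-- ===== SOURCE A (Python) =====
-- import typing
--
-- def _sorted_list_to_list_of_contiguous_sub_lists(lst: typing.List[int]) -> typing.List[typing.List[int]]:
--     res = []
--     this_lst = []
--     for i, x in enumerate(lst):
--         if i == 0 or x == lst[i - 1] + 1:
--             this_lst.append(x)
--         else:
--             res.append(this_lst)
--             this_lst = [x]
--
--     # handle the last one
--     if this_lst:
--         res.append(this_lst)
--
--     return res
-- ===== SOURCE B (Python) =====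
-- def _sorted_list_to_list_of_contiguous_sub_lists(lst):
--     res = []
--     n = len(lst)
--     i = 0
--     while i < n:
--         j = i + 1
--         while j < n and lst[j] == lst[j - 1] + 1:
--             j += 1
--         res.append(lst[i:j])
--         i = j
--     return res
-- ===== Notes on version B (the rewrite author's own statement) =====
-- stated objective: alternative
-- what changed: Replaces A's single enumerate pass that grows a current buffer element by element with a run-chopping index loop: advance j to the end of the maximal contiguous run starting at i, slice that run off whole with lst[i:j], and continue from j.
import Mathlib
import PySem

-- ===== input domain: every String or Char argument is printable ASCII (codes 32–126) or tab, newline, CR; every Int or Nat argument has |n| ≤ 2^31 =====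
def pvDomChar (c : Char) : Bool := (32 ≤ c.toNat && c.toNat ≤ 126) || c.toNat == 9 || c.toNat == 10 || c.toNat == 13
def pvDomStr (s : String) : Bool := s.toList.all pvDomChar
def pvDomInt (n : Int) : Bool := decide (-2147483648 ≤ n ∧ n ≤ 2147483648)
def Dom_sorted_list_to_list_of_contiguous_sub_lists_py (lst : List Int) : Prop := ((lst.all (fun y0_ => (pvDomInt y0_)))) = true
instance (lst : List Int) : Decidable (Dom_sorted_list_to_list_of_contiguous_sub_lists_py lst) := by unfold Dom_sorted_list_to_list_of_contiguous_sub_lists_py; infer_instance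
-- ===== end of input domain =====

-- B replaces A's element-by-element buffer accumulation with a run-chopping index loop
-- (advance j past the maximal contiguous run at i, slice it off whole); same cost, different structure.

-- ===== PORT A =====
-- loop body of A: `if i == 0 or x == lst[i-1] + 1: this_lst.append(x) else: res.append(this_lst); this_lst=[x]`
-- (pyGetD default 0 is never observed: when ix.1 ≠ 0 the index ix.1 - 1 is in range)
def pvStepA (lst : List Int) (s : List (List Int) × List Int) (ix : Int × Int) :
    List (List Int) × List Int :=
  if ix.1 = 0 ∨ ix.2 = PySem.List.pyGetD lst (ix.1 - 1) 0 + 1 then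
    (s.1, s.2 ++ [ix.2])
  else
    (s.1 ++ [s.2], [ix.2])

def sorted_list_to_list_of_contiguous_sub_lists_py (lst : List Int) : List (List Int) :=
  let st := (PySem.List.enumerate lst).foldl (pvStepA lst) ([], [])
  if st.2 ≠ [] then st.1 ++ [st.2] else st.1

-- ===== PORT B =====
-- inner loop of B: `while j < n and lst[j] == lst[j - 1] + 1: j += 1`
def pvInner (lst : List Int) (n : Nat) (j : Nat) : Nat :=
  if j < n ∧ PySem.List.pyGetD lst (j : Int) 0 = PySem.List.pyGetD lst ((j : Int) - 1) 0 + 1 then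
    pvInner lst n (j + 1)
  else j
termination_by n - j
decreasing_by omega

-- the inner while loop only moves j forward (termination measure for the outer loop)
lemma pvInner_ge (lst : List Int) (n j : Nat) : j ≤ pvInner lst n j := by
  induction j using pvInner.induct lst n with
  | case1 j h ih => rw [pvInner, if_pos h]; omega
  | case2 j h => rw [pvInner, if_neg h]

-- outer loop of B: `while i < n: j = …inner…; res.append(lst[i:j]); i = j`
def pvOuter (lst : List Int) (n : Nat) (i : Nat) (res : List (List Int)) : List (List Int) :=
  if i < n then
    let j := pvInner lst n (i + 1)
    pvOuter lst n j (res ++ [PySem.List.slice lst (some (i : Int)) (some (j : Int))])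
  else res
termination_by n - i
decreasing_by have := pvInner_ge lst n (i + 1); omega

def sorted_list_to_list_of_contiguous_sub_lists_py_alt (lst : List Int) : List (List Int) :=
  pvOuter lst lst.length 0 []

-- ===== PRECONDITION & SPEC =====
def Spec_sorted_list_to_list_of_contiguous_sub_lists_py (lst : List Int) (out : List (List Int)) : Prop := out = sorted_list_to_list_of_contiguous_sub_lists_py_alt lst
instance (lst : List Int) (out : List (List Int)) : Decidable (Spec_sorted_list_to_list_of_contiguous_sub_lists_py lst out) := by unfold Spec_sorted_list_to_list_of_contiguous_sub_lists_py; infer_instance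

-- ===== CLAIM (what is proved, stated in full; the proofs are below) =====
def Claim_equal_sorted_list_to_list_of_contiguous_sub_lists_py : Prop := ∀ (lst : List Int), Dom_sorted_list_to_list_of_contiguous_sub_lists_py lst → Spec_sorted_list_to_list_of_contiguous_sub_lists_py lst (sorted_list_to_list_of_contiguous_sub_lists_py lst)

-- ===== LEMMAS AND PROOFS =====

-- length of the contiguous run at the head of xs continuing prev
def pvRunLen : Int → List Int → Nat
  | _, [] => 0
  | p, x :: xs => if x = p + 1 then pvRunLen x xs + 1 else 0

-- the common reference form both loops are reduced to: chop maximal runs off the front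
def pvAltList : List Int → List (List Int)
  | [] => []
  | x :: xs => (x :: xs.take (pvRunLen x xs)) :: pvAltList (xs.drop (pvRunLen x xs))
termination_by l => l.length
decreasing_by simp [List.length_drop]

-- A's loop with the lookup lst[i-1] replaced by a carried "previous element".
def pvGo : List Int → Int → List (List Int) → List Int → List (List Int)
  | [], _, res, cur => res ++ [cur]
  | x :: xs, prev, res, cur =>
    if x = prev + 1 then pvGo xs x res (cur ++ [x]) else pvGo xs x (res ++ [cur]) [x]

lemma pvGo_eq (xs : List Int) (prev : Int) (res : List (List Int)) (cur : List Int) :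
    pvGo xs prev res cur
      = res ++ (cur ++ xs.take (pvRunLen prev xs)) :: pvAltList (xs.drop (pvRunLen prev xs)) := by
  induction xs generalizing prev res cur with
  | nil => simp [pvGo, pvRunLen, pvAltList]
  | cons y ys ih =>
    by_cases h : y = prev + 1
    · rw [pvGo]
      simp only [pvRunLen, if_pos h, List.take_succ_cons, List.drop_succ_cons]
      rw [ih]
      simp
    · rw [pvGo]
      simp only [pvRunLen, if_neg h, List.take_zero, List.drop_zero]
      rw [ih, pvAltList]
      simp

lemma pvGetD_last (pre suf : List Int) (h : pre ≠ []) :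
    PySem.List.pyGetD (pre ++ suf) ((pre.length : Int) - 1) 0 = pre.getLast h := by
  have hp : 0 < pre.length := List.length_pos_of_ne_nil h
  have hcast : ((pre.length : Int) - 1) = ((pre.length - 1 : Nat) : Int) := by omega
  rw [hcast, PySem.List.pyGetD_natCast]
  have hlt : pre.length - 1 < (pre ++ suf).length := by simp; omega
  have hlt' : pre.length - 1 < pre.length := by omega
  rw [List.getD_eq_getElem _ _ hlt, List.getElem_append_left hlt',
    List.getLast_eq_getElem]

lemma pvLoopA (suf : List Int) : ∀ (pre : List Int) (res : List (List Int)) (cur : List Int)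
    (hpre : pre ≠ []), cur ≠ [] →
    (let st := (PySem.List.enumerate suf (pre.length : Int)).foldl (pvStepA (pre ++ suf)) (res, cur);
     if st.2 ≠ [] then st.1 ++ [st.2] else st.1)
      = pvGo suf (pre.getLast hpre) res cur := by
  induction suf with
  | nil =>
    intro pre res cur hpre hcur
    simp [PySem.List.enumerate_nil, pvGo, hcur]
  | cons y ys ih =>
    intro pre res cur hpre hcur
    have hp : 0 < pre.length := List.length_pos_of_ne_nil hpre
    rw [PySem.List.enumerate_cons]
    simp only [List.foldl_cons]
    have hne : ¬ ((pre.length : Int) = 0) := by omega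
    rw [show pvStepA (pre ++ y :: ys) (res, cur) ((pre.length : Int), y)
        = if y = pre.getLast hpre + 1 then (res, cur ++ [y]) else (res ++ [cur], [y]) from by
      rw [pvStepA]
      simp only [pvGetD_last pre (y :: ys) hpre]
      simp [hpre]]
    have hpre' : pre ++ [y] ≠ [] := by simp
    have hlen : (pre.length : Int) + 1 = ((pre ++ [y]).length : Int) := by simp
    have happ : pre ++ y :: ys = (pre ++ [y]) ++ ys := by simp
    by_cases h : y = pre.getLast hpre + 1
    · rw [if_pos h, pvGo, if_pos h]
      rw [hlen, happ]
      exact ih (pre ++ [y]) res (cur ++ [y]) hpre' (by simp) |>.trans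
        (by rw [List.getLast_append_singleton])
    · rw [if_neg h, pvGo, if_neg h]
      rw [hlen, happ]
      exact ih (pre ++ [y]) (res ++ [cur]) [y] hpre' (by simp) |>.trans
        (by rw [List.getLast_append_singleton])

-- B's inner while loop counts exactly the run length of the suffix it scans
lemma pvInner_eq (lst : List Int) (s : List Int) : ∀ (j : Nat), 0 < j → lst.drop j = s →
    pvInner lst lst.length j = j + pvRunLen (PySem.List.pyGetD lst ((j : Int) - 1) 0) s := by
  induction s with
  | nil =>
    intro j hj hs
    have hn : lst.length ≤ j := by
      by_contra hlt
      exact absurd hs (by simp [List.drop_eq_nil_iff]; omega)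
    rw [pvInner, if_neg (by omega), pvRunLen]
    simp
  | cons a t ih =>
    intro j hj hs
    have hjn : j < lst.length := by
      by_contra hge
      rw [List.drop_eq_nil_iff.mpr (by omega)] at hs
      exact absurd hs (by simp)
    have hgetj : PySem.List.pyGetD lst (j : Int) 0 = a := by
      have h0 : lst[j]? = some a := by
        have := congrArg (fun l => l[0]?) hs
        simpa using this
      simp [PySem.List.pyGetD_natCast, List.getD_eq_getElem?_getD, h0]
    have hdrop : lst.drop (j + 1) = t := by
      have : (lst.drop j).tail = lst.drop (j + 1) := by
        rw [List.tail_drop]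
      rw [← this, hs]
      rfl
    by_cases h : a = PySem.List.pyGetD lst ((j : Int) - 1) 0 + 1
    · rw [pvInner, if_pos ⟨hjn, by rw [hgetj]; exact h⟩]
      rw [ih (j + 1) (by omega) hdrop]
      rw [show (((j + 1 : Nat) : Int) - 1) = (j : Int) from by push_cast; ring, hgetj]
      rw [pvRunLen, if_pos h]
      omega
    · rw [pvInner, if_neg (by rw [hgetj]; tauto)]
      rw [pvRunLen, if_neg h]
      omega

-- B's outer loop, started at offset i, computes the run decomposition of lst.drop i
lemma pvOuter_eq (lst : List Int) (s : List Int) : ∀ (i : Nat) (res : List (List Int)),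
    lst.drop i = s → pvOuter lst lst.length i res = res ++ pvAltList s := by
  induction s using pvAltList.induct with
  | case1 =>
    intro i res hs
    have : ¬ i < lst.length := by
      by_contra hlt
      exact absurd hs (by simp [List.drop_eq_nil_iff]; omega)
    rw [pvOuter, if_neg this, pvAltList]
    simp
  | case2 x xs ih =>
    intro i res hs
    have hin : i < lst.length := by
      by_contra hge
      rw [List.drop_eq_nil_iff.mpr (by omega)] at hs
      exact absurd hs (by simp)
    have hgeti : PySem.List.pyGetD lst (((i + 1 : Nat) : Int) - 1) 0 = x := by
      rw [show (((i + 1 : Nat) : Int) - 1) = (i : Int) from by push_cast; ring]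
      have h0 : lst[i]? = some x := by
        have := congrArg (fun l => l[0]?) hs
        simpa using this
      simp [PySem.List.pyGetD_natCast, List.getD_eq_getElem?_getD, h0]
    have hdrop : lst.drop (i + 1) = xs := by
      have : (lst.drop i).tail = lst.drop (i + 1) := by rw [List.tail_drop]
      rw [← this, hs]
      rfl
    have hj : pvInner lst lst.length (i + 1) = i + 1 + pvRunLen x xs := by
      rw [pvInner_eq lst xs (i + 1) (by omega) hdrop, hgeti]
    rw [pvOuter, if_pos hin]
    simp only [hj]
    have hslice : PySem.List.slice lst (some (i : Int)) (some ((i + 1 + pvRunLen x xs : Nat) : Int))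
        = x :: xs.take (pvRunLen x xs) := by
      rw [PySem.List.slice_natCast, hs]
      have : i + 1 + pvRunLen x xs - i = pvRunLen x xs + 1 := by omega
      rw [this, List.take_succ_cons]
    have hdrop' : lst.drop (i + 1 + pvRunLen x xs) = xs.drop (pvRunLen x xs) := by
      rw [show i + 1 + pvRunLen x xs = (i + 1) + pvRunLen x xs from rfl, ← List.drop_drop, hdrop]
    rw [hslice, ih (i + 1 + pvRunLen x xs) (res ++ [x :: xs.take (pvRunLen x xs)]) hdrop']
    rw [pvAltList]
    simp

-- ===== VERDICT (by name: the statement is the Claim_ definition above) =====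
theorem sorted_list_to_list_of_contiguous_sub_lists_py_spec : Claim_equal_sorted_list_to_list_of_contiguous_sub_lists_py := by
  intro lst _
  unfold Spec_sorted_list_to_list_of_contiguous_sub_lists_py
  unfold sorted_list_to_list_of_contiguous_sub_lists_py sorted_list_to_list_of_contiguous_sub_lists_py_alt
  rw [pvOuter_eq lst lst 0 [] (by simp)]
  cases lst with
  | nil => simp [PySem.List.enumerate_nil, pvAltList]
  | cons x xs =>
    rw [PySem.List.enumerate_cons]
    simp only [List.foldl_cons]
    rw [show pvStepA (x :: xs) (([], []) : List (List Int) × List Int) ((0 : Int), x)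
        = ([], [x]) from by simp [pvStepA]]
    have h1 : ((0 : Int) + 1) = (([x].length : Int)) := by simp
    have h2 : x :: xs = [x] ++ xs := rfl
    rw [h1]
    have := pvLoopA xs [x] [] [x] (by simp) (by simp)
    rw [h2]
    simp only at this
    rw [this]
    rw [pvGo_eq]
    simp [List.getLast, pvAltList]
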